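-- pv_equiv track=rewrite | github.com/settintotrieste/Victoria-3-Cold-War-Era-Mod-CWE | localization/translate.py | separateTextAndSymbols
-- ===== SOURCE A (Python) =====
-- def separateTextAndSymbols(rawText) -> tuple[str, str]:
--     # $foo$, [var] and #foobar#! are symbols which should not be translated
--     texts = [""]
--     symbols = [""]
--     isSymbol = False
--     symbolBrackets = {"$": "$", "[": "]", "#": "!", "@": "!"}
--     symbolPrefix = None
--     for ch in rawText:
--         if not isSymbol and ch in symbolBrackets:
--             # start of command
--             isSymbol = True
--             symbolPrefix = ch
--             texts.append("")
--             symbols[-1] += ch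
--             continue
--         elif isSymbol and ch == symbolBrackets[symbolPrefix]:
--             # end of command
--             isSymbol = False
--             symbols[-1] += ch
--             symbols.append("")
--             continue
--         if isSymbol:
--             symbols[-1] += ch
--         else:
--             texts[-1] += ch
--     return texts, symbols
-- ===== SOURCE B (Python) =====
-- def separateTextAndSymbols(rawText) -> tuple[str, str]:
--     # jump from one symbol to the next with find() instead of a per-char state machine
--     symbolBrackets = {"$": "$", "[": "]", "#": "!", "@": "!"}
--     texts, symbols = [], []
--     rest = rawText
--     while True:
--         i = next((k for k, ch in enumerate(rest) if ch in symbolBrackets), None)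
--         if i is None:
--             texts.append(rest)
--             symbols.append("")
--             return texts, symbols
--         close = symbolBrackets[rest[i]]
--         j = rest.find(close, i + 1)
--         if j == -1:
--             texts.append(rest[:i])
--             texts.append("")
--             symbols.append(rest[i:])
--             return texts, symbols
--         texts.append(rest[:i])
--         symbols.append(rest[i:j + 1])
--         rest = rest[j + 1:]
-- ===== Notes on version B (the rewrite author's own statement) =====
-- stated objective: faster
-- what changed: Replaces the per-character state machine (isSymbol flag, symbolPrefix, texts[-1] += ch) by a loop that jumps straight to the next opening bracket and its matching close with enumerate/str.find and slices each text/symbol piece off whole.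
import Mathlib
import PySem

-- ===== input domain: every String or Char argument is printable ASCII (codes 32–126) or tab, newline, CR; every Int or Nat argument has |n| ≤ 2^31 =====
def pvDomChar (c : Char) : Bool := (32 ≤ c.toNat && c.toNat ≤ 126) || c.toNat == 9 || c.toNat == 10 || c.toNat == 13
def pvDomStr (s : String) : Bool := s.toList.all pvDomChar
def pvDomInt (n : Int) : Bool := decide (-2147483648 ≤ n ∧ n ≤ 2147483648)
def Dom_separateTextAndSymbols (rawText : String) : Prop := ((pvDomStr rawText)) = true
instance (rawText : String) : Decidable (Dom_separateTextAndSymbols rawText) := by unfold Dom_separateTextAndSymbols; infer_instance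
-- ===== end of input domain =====

-- B replaces A's per-character state machine by a find-the-next-bracket loop slicing whole pieces (measured faster: A's texts[-1] += ch re-copies the growing piece per character).

-- ===== PORT A =====
-- the dict {"$": "$", "[": "]", "#": "!", "@": "!"}
def sepBrackets : PySem.Dict Char Char := PySem.Dict.ofList [('$', '$'), ('[', ']'), ('#', '!'), ('@', '!')]

-- `xs[-1] += ch` on a list of pieces kept in reverse order (pieces as List Char per the PySem convention)
def sepAddLast (xs : List (List Char)) (ch : Char) : List (List Char) :=
  match xs with
  | [] => []
  | p :: r => (p ++ [ch]) :: r

-- the loop body of A; state = (texts, symbols, isSymbol, symbolPrefix), texts/symbols in reverse order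
def sepStep (st : List (List Char) × List (List Char) × Bool × Option Char) (ch : Char) :
    List (List Char) × List (List Char) × Bool × Option Char :=
  let (texts, symbols, isSymbol, symbolPrefix) := st
  if !isSymbol && (PySem.Dict.get? sepBrackets ch).isSome then
    ([] :: texts, sepAddLast symbols ch, true, some ch)
  else if isSymbol && (symbolPrefix.bind (fun p => PySem.Dict.get? sepBrackets p) == some ch) then
    (texts, [] :: sepAddLast symbols ch, false, symbolPrefix)
  else if isSymbol then
    (texts, sepAddLast symbols ch, isSymbol, symbolPrefix)
  else
    (sepAddLast texts ch, symbols, isSymbol, symbolPrefix)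

def separateTextAndSymbols (rawText : String) : List String × List String :=
  let st := rawText.toList.foldl sepStep ([[]], [[]], false, none)
  (st.1.reverse.map String.ofList, st.2.1.reverse.map String.ofList)

-- ===== PORT B =====
-- the while-loop of B: accumulators appended at the end, `rest` shrinks past each closed symbol
def sepAltGo (texts symbols : List (List Char)) (rest : List Char) : List (List Char) × List (List Char) :=
  match h : rest.findIdx? (fun ch => (PySem.Dict.get? sepBrackets ch).isSome) with
  | none => (texts ++ [rest], symbols ++ [[]])
  | some i =>
    let close := (PySem.Dict.get? sepBrackets (rest.getD i ' ')).getD ' '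
    match (rest.drop (i + 1)).findIdx? (· == close) with
    | none => (texts ++ [rest.take i, []], symbols ++ [rest.drop i])
    | some j =>
        sepAltGo (texts ++ [rest.take i]) (symbols ++ [(rest.drop i).take (j + 2)])
          (rest.drop (i + 1 + (j + 1)))
termination_by rest.length
decreasing_by
  have hi : i < rest.length := List.findIdx?_eq_some_iff_findIdx_eq.mp h |>.1
  simp [List.length_drop]; omega

def separateTextAndSymbols_alt (rawText : String) : List String × List String :=
  let (ts, ss) := sepAltGo [] [] rawText.toList
  (ts.map String.ofList, ss.map String.ofList)

-- ===== PRECONDITION & SPEC =====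
def Spec_separateTextAndSymbols (rawText : String) (out : List String × List String) : Prop := out = separateTextAndSymbols_alt rawText
instance (rawText : String) (out : List String × List String) : Decidable (Spec_separateTextAndSymbols rawText out) := by unfold Spec_separateTextAndSymbols; infer_instance

-- ===== CLAIM (what is proved, stated in full; the proofs are below) =====
def Claim_equal_separateTextAndSymbols : Prop := ∀ (rawText : String), Dom_separateTextAndSymbols rawText → Spec_separateTextAndSymbols rawText (separateTextAndSymbols rawText)

-- ===== LEMMAS AND PROOFS =====

def consHead (cur : List Char) : List (List Char) → List (List Char)
  | [] => [cur]
  | t :: r => (cur ++ t) :: r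

theorem consHead_consHead (a b : List Char) (X : List (List Char)) :
    consHead a (consHead b X) = consHead (a ++ b) X := by
  cases X <;> simp [consHead]

theorem findIdx?_lt_length {α : Type} {p : α → Bool} {l : List α} {i : Nat}
    (h : l.findIdx? p = some i) : i < l.length := by
  exact (List.findIdx?_eq_some_iff_findIdx_eq.mp h).1

theorem sepAltGo_eq1 (ts ss : List (List Char)) (rest : List Char)
    (h : rest.findIdx? (fun ch => (sepBrackets.get? ch).isSome) = none) :
    sepAltGo ts ss rest = (ts ++ [rest], ss ++ [[]]) := by
  rw [sepAltGo]; split <;> simp_all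

theorem sepAltGo_eq2 (ts ss : List (List Char)) (rest : List Char) (i : Nat)
    (h : rest.findIdx? (fun ch => (sepBrackets.get? ch).isSome) = some i)
    (hj : (rest.drop (i + 1)).findIdx? (fun x => x == (sepBrackets.get? (rest.getD i ' ')).getD ' ') = none) :
    sepAltGo ts ss rest = (ts ++ [rest.take i, []], ss ++ [rest.drop i]) := by
  rw [sepAltGo]; split
  · simp_all
  · rename_i i' h'
    rw [h] at h'; injection h' with h'; subst h'
    dsimp only; split
    · rfl
    · rename_i j hj2; rw [hj] at hj2; cases hj2

theorem sepAltGo_eq3 (ts ss : List (List Char)) (rest : List Char) (i j : Nat)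
    (h : rest.findIdx? (fun ch => (sepBrackets.get? ch).isSome) = some i)
    (hj : (rest.drop (i + 1)).findIdx? (fun x => x == (sepBrackets.get? (rest.getD i ' ')).getD ' ') = some j) :
    sepAltGo ts ss rest = sepAltGo (ts ++ [rest.take i]) (ss ++ [(rest.drop i).take (j + 2)])
      (rest.drop (i + 1 + (j + 1))) := by
  rw [sepAltGo]; split
  · simp_all
  · rename_i i' h'
    rw [h] at h'; injection h' with h'; subst h'
    dsimp only; split
    · rename_i hj2; rw [hj] at hj2; cases hj2
    · rename_i j' hj2; rw [hj] at hj2; injection hj2 with hj2; subst hj2; rfl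

theorem sepAltGo_append_aux (n : Nat) : ∀ (l : List Char), l.length ≤ n → ∀ (ts ss : List (List Char)),
    sepAltGo ts ss l = (ts ++ (sepAltGo [] [] l).1, ss ++ (sepAltGo [] [] l).2) := by
  induction n with
  | zero =>
    intro l hl ts ss
    have hnil : l = [] := List.eq_nil_of_length_eq_zero (Nat.le_zero.mp hl)
    subst hnil
    rw [sepAltGo_eq1 _ _ _ (by simp), sepAltGo_eq1 [] [] _ (by simp)]; simp
  | succ n ih =>
    intro l hl ts ss
    cases hf : l.findIdx? (fun ch => (sepBrackets.get? ch).isSome) with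
    | none => rw [sepAltGo_eq1 _ _ _ hf, sepAltGo_eq1 [] [] _ hf]; simp
    | some i =>
      cases hg : (l.drop (i + 1)).findIdx? (fun x => x == (sepBrackets.get? (l.getD i ' ')).getD ' ') with
      | none => rw [sepAltGo_eq2 _ _ _ _ hf hg, sepAltGo_eq2 [] [] _ _ hf hg]; simp
      | some j =>
        have hi : i < l.length := findIdx?_lt_length hf
        have hlen : (l.drop (i + 1 + (j + 1))).length ≤ n := by
          simp [List.length_drop]; omega
        rw [sepAltGo_eq3 _ _ _ _ _ hf hg, sepAltGo_eq3 [] [] _ _ _ hf hg,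
          ih _ hlen, ih _ hlen ([] ++ [l.take i])]
        simp

theorem sepAltGo_append (ts ss : List (List Char)) (l : List Char) :
    sepAltGo ts ss l = (ts ++ (sepAltGo [] [] l).1, ss ++ (sepAltGo [] [] l).2) :=
  sepAltGo_append_aux l.length l (le_refl _) ts ss

theorem sepAltGo_fst_ne_nil (l : List Char) : (sepAltGo [] [] l).1 ≠ [] := by
  cases hf : l.findIdx? (fun ch => (sepBrackets.get? ch).isSome) with
  | none => rw [sepAltGo_eq1 _ _ _ hf]; simp
  | some i =>
    cases hg : (l.drop (i + 1)).findIdx? (fun x => x == (sepBrackets.get? (l.getD i ' ')).getD ' ') with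
    | none => rw [sepAltGo_eq2 _ _ _ _ hf hg]; simp
    | some j => rw [sepAltGo_eq3 _ _ _ _ _ hf hg, sepAltGo_append]; simp

theorem consHead_nil {X : List (List Char)} (h : X ≠ []) : consHead [] X = X := by
  cases X with
  | nil => exact absurd rfl h
  | cons t r => simp [consHead]

theorem sepAlt_cons_notOpen (ch : Char) (l : List Char) (hop : sepBrackets.get? ch = none) :
    sepAltGo [] [] (ch :: l) = (consHead [ch] (sepAltGo [] [] l).1, (sepAltGo [] [] l).2) := by
  have hcons : (ch :: l).findIdx? (fun c => (sepBrackets.get? c).isSome)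
      = (l.findIdx? (fun c => (sepBrackets.get? c).isSome)).map (· + 1) := by
    simp [List.findIdx?_cons, hop]
  cases hf : l.findIdx? (fun c => (sepBrackets.get? c).isSome) with
  | none =>
    rw [sepAltGo_eq1 [] [] _ (by rw [hcons, hf]; rfl), sepAltGo_eq1 [] [] _ hf]
    simp [consHead]
  | some i =>
    have hf' : (ch :: l).findIdx? (fun c => (sepBrackets.get? c).isSome) = some (i + 1) := by
      rw [hcons, hf]; rfl
    have hgetD : (ch :: l).getD (i + 1) ' ' = l.getD i ' ' := by simp [List.getD]
    cases hg : (l.drop (i + 1)).findIdx? (fun x => x == (sepBrackets.get? (l.getD i ' ')).getD ' ') with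
    | none =>
      have hg' : ((ch :: l).drop (i + 1 + 1)).findIdx?
          (fun x => x == (sepBrackets.get? ((ch :: l).getD (i + 1) ' ')).getD ' ') = none := by
        rw [hgetD]; simpa using hg
      rw [sepAltGo_eq2 [] [] _ _ hf' hg', sepAltGo_eq2 [] [] _ _ hf hg]
      simp [consHead]
    | some j =>
      have hg' : ((ch :: l).drop (i + 1 + 1)).findIdx?
          (fun x => x == (sepBrackets.get? ((ch :: l).getD (i + 1) ' ')).getD ' ') = some j := by
        rw [hgetD]; simpa using hg
      rw [sepAltGo_eq3 [] [] _ _ _ hf' hg', sepAltGo_eq3 [] [] _ _ _ hf hg]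
      rw [sepAltGo_append, sepAltGo_append ([] ++ [List.take i l])]
      have hdrop : (ch :: l).drop (i + 1 + 1 + (j + 1)) = l.drop (i + 1 + (j + 1)) := by
        have he : i + 1 + 1 + (j + 1) = (i + 1 + (j + 1)) + 1 := by omega
        rw [he, List.drop_succ_cons]
      rw [hdrop]
      simp [consHead]

theorem sepMaster (n : Nat) : ∀ (l : List Char), l.length ≤ n →
    ((∀ (cur : List Char) (ts ss : List (List Char)) (pfx : Option Char),
        (l.foldl sepStep (cur :: ts, [] :: ss, false, pfx)).1
            = (consHead cur (sepAltGo [] [] l).1).reverse ++ ts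
        ∧ (l.foldl sepStep (cur :: ts, [] :: ss, false, pfx)).2.1
            = (sepAltGo [] [] l).2.reverse ++ ss)
     ∧ (∀ (p c : Char) (sym : List Char) (ts ss : List (List Char)),
          sepBrackets.get? p = some c →
          (l.foldl sepStep ([] :: ts, sym :: ss, true, some p)).1 =
              (match l.findIdx? (fun x => x == c) with
               | none => [] :: ts
               | some j => (consHead [] (sepAltGo [] [] (l.drop (j + 1))).1).reverse ++ ts)
          ∧ (l.foldl sepStep ([] :: ts, sym :: ss, true, some p)).2.1 =
              (match l.findIdx? (fun x => x == c) with
               | none => (sym ++ l) :: ss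
               | some j => (sepAltGo [] [] (l.drop (j + 1))).2.reverse ++ ((sym ++ l.take (j + 1)) :: ss)))) := by
  induction n with
  | zero =>
    intro l hl
    have hnil : l = [] := List.eq_nil_of_length_eq_zero (Nat.le_zero.mp hl)
    subst hnil
    constructor
    · intro cur ts ss pfx
      rw [sepAltGo_eq1 [] [] _ (by simp)]
      simp [consHead]
    · intro p c sym ts ss hc
      simp
  | succ n ih =>
    intro l hl
    cases l with
    | nil =>
      constructor
      · intro cur ts ss pfx
        rw [sepAltGo_eq1 [] [] _ (by simp)]
        simp [consHead]
      · intro p c sym ts ss hc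
        simp
    | cons ch l' =>
      have hl' : l'.length ≤ n := by simp at hl; omega
      constructor
      · -- text mode
        intro cur ts ss pfx
        rw [List.foldl_cons]
        cases hop : sepBrackets.get? ch with
        | some c =>
          have step : sepStep (cur :: ts, [] :: ss, false, pfx) ch
              = ([] :: cur :: ts, [ch] :: ss, true, some ch) := by
            simp [sepStep, sepAddLast, hop]
          rw [step]
          obtain ⟨hS1, hS2⟩ := (ih l' hl').2 ch c [ch] (cur :: ts) ss hop
          have hff : (ch :: l').findIdx? (fun c => (sepBrackets.get? c).isSome) = some 0 := by
            simp [List.findIdx?_cons, hop]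
          have hcl : (sepBrackets.get? ((ch :: l').getD 0 ' ')).getD ' ' = c := by simp [hop]
          cases hfc : l'.findIdx? (fun x => x == c) with
          | none =>
            have hin : ((ch :: l').drop (0 + 1)).findIdx?
                (fun x => x == (sepBrackets.get? ((ch :: l').getD 0 ' ')).getD ' ') = none := by
              rw [hcl]; simpa using hfc
            rw [sepAltGo_eq2 [] [] _ 0 hff hin]
            rw [hfc] at hS1 hS2
            simp only at hS1 hS2
            constructor
            · rw [hS1]; simp [consHead]
            · rw [hS2]; simp
          | some j =>
            have hin : ((ch :: l').drop (0 + 1)).findIdx?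
                (fun x => x == (sepBrackets.get? ((ch :: l').getD 0 ' ')).getD ' ') = some j := by
              rw [hcl]; simpa using hfc
            rw [sepAltGo_eq3 [] [] _ 0 _ hff hin, sepAltGo_append]
            rw [hfc] at hS1 hS2
            simp only at hS1 hS2
            have hne := sepAltGo_fst_ne_nil ((ch :: l').drop (0 + 1 + (j + 1)))
            have hdr : (ch :: l').drop (0 + 1 + (j + 1)) = l'.drop (j + 1) := by
              have he : 0 + 1 + (j + 1) = (j + 1) + 1 := by omega
              rw [he, List.drop_succ_cons]
            rw [hdr] at hne ⊢
            constructor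
            · rw [hS1, consHead_nil (sepAltGo_fst_ne_nil _)]
              simp [consHead]
            · rw [hS2]
              simp
        | none =>
          have step : sepStep (cur :: ts, [] :: ss, false, pfx) ch
              = ((cur ++ [ch]) :: ts, [] :: ss, false, pfx) := by
            simp [sepStep, sepAddLast, hop]
          rw [step]
          obtain ⟨h1, h2⟩ := (ih l' hl').1 (cur ++ [ch]) ts ss pfx
          rw [sepAlt_cons_notOpen ch l' hop]
          constructor
          · rw [h1, consHead_consHead]
          · exact h2
      · -- symbol mode
        intro p c sym ts ss hc
        rw [List.foldl_cons]
        by_cases hch : ch = c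
        · subst hch
          have step : sepStep ([] :: ts, sym :: ss, true, some p) ch
              = ([] :: ts, [] :: (sym ++ [ch]) :: ss, false, some p) := by
            simp [sepStep, sepAddLast, hc]
          rw [step]
          obtain ⟨h1, h2⟩ := (ih l' hl').1 [] ts ((sym ++ [ch]) :: ss) (some p)
          have hff : (ch :: l').findIdx? (fun x => x == ch) = some 0 := by
            simp [List.findIdx?_cons]
          rw [hff]
          simp only [List.drop_succ_cons, List.drop_zero, List.take_succ_cons, List.take_zero]
          exact ⟨h1, by rw [h2]⟩
        · have step : sepStep ([] :: ts, sym :: ss, true, some p) ch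
              = ([] :: ts, (sym ++ [ch]) :: ss, true, some p) := by
            simp [sepStep, sepAddLast, hc, Ne.symm hch]
          rw [step]
          obtain ⟨h1, h2⟩ := (ih l' hl').2 p c (sym ++ [ch]) ts ss hc
          have hcons : (ch :: l').findIdx? (fun x => x == c)
              = (l'.findIdx? (fun x => x == c)).map (· + 1) := by
            simp [List.findIdx?_cons, hch]
          cases hfc : l'.findIdx? (fun x => x == c) with
          | none =>
            rw [hcons, hfc]
            rw [hfc] at h1 h2
            simp only at h1 h2
            exact ⟨h1, by rw [h2]; simp⟩
          | some j =>
            rw [hcons, hfc]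
            rw [hfc] at h1 h2
            simp only at h1 h2
            simp only [Option.map_some]
            constructor
            · rw [h1]; simp
            · rw [h2]; simp

-- ===== VERDICT (by name: the statement is the Claim_ definition above) =====
theorem separateTextAndSymbols_spec : Claim_equal_separateTextAndSymbols := by
  intro rawText _
  unfold Spec_separateTextAndSymbols separateTextAndSymbols separateTextAndSymbols_alt
  obtain ⟨h1, h2⟩ := (sepMaster rawText.toList.length rawText.toList (le_refl _)).1 [] [] [] none
  have hne := sepAltGo_fst_ne_nil rawText.toList
  rw [consHead_nil hne] at h1
  cases hG : sepAltGo [] [] rawText.toList with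
  | mk ts ss =>
    rw [hG] at h1 h2 hne
    simp [h1, h2]
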